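-- pv_equiv track=rewrite | github.com/etnes/MUMer | MUMer.py | createAlignedGenomes
-- ===== SOURCE A (Python) =====
-- def SmithWaterman(a, b):
--     #TODO -> position kao klasa
--     def mutationCost(x, y):
--         if (x == y):
--             return 2
--
--         return -1
--
--     #insertion/deletion cost
--     d = -2
--
--     #initializing matrix[a.len + 1][b.len + 1]
--     dp = [x[:] for x in [[0] * (len(b) + 1)] * (len(a) + 1)]
--     path = [x[:] for x in [[(0, 0)] * (len(b) + 1)] * (len(a) + 1)]
--
--     #initializing path edges
--     for i in range(1, len(a) + 1): path[i][0] = (-1, 0)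
--     for j in range(1, len(b) + 1): path[0][j] = (0, -1)
--
--     #SmithWaterman algorithm (with path reconstruction)
--     for i in range(1, len(a) + 1):
--         for j in range(1, len(b) + 1):
--             #deletion
--             deletion = dp[i - 1][j] + d
--             dp[i][j] = deletion # if (deletion > 0) else 0
--             path[i][j] = (-1, 0)
--
--             #insertsion
--             insertion = dp[i][j -1] + d
--             if (insertion > dp[i][j]):
--                 dp[i][j] = insertion
--                 path[i][j] = (0, -1)
--
--             #mutation
--             mutation = dp[i - 1][j - 1] + mutationCost(a[i - 1], b[j - 1])
--             if (mutation > dp[i][j]):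
--                 dp[i][j] = mutation
--                 path[i][j] = (-1, -1)
--
--     #reconstruction
--     aa = ""
--     bb = ""
--     position = (len(a), len(b))
--     while(position != (0, 0)):
--         #TODO -> lista za konkatenaciju stringova
--         direction = path[position[0]][position[1]]
--         aa = (a[position[0] - 1] if direction[0] == -1 else "-") + aa
--         bb = (b[position[1] - 1] if direction[1] == -1 else "-") + bb
--
--         position = (position[0] + direction[0], position[1] + direction[1])
--
--     return (aa, bb)
--
-- def createAlignedGenomes(S1, S2, MUMs):
--     alignedS1 = ""
--     alignedS2 = ""
--
--     startIndex1 = 0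
--     startIndex2 = 0
--
--     for mum in MUMs:
--         #first we concat part that is located before mum using SmithWaterman algorithm
--         (part1, part2) = SmithWaterman(S1[startIndex1:mum[1]], S2[startIndex2:mum[2]])
--
--         #TODO -> zajednicki substring? (da ne vuces dva puta isti substring)
--         alignedS1 += part1 + " [ " + S1[mum[1]:mum[1] + mum[0]] + " ] "
--         alignedS2 += part2 + " [ " + S2[mum[2]:mum[2] + mum[0]] + " ] "
--
--         startIndex1 = mum[1] + mum[0]
--         startIndex2 = mum[2] + mum[0]
--
--     #final appending
--     (part1, part2) = SmithWaterman(S1[startIndex1:], S2[startIndex2:])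
--     alignedS1 += part1
--     alignedS2 += part2
--
--     return (alignedS1, alignedS2)
-- ===== SOURCE B (Python) =====
-- def createAlignedGenomes(S1, S2, MUMs):
--     # B: single forward DP pass that builds the aligned strings as the DP values
--     # (score, aligned_a, aligned_b) per cell; no path matrix and no traceback pass.
--     # Same scoring (match 2, mismatch -1, gap -2), same zero-valued borders and the
--     # same deletion >= insertion >= mutation tie priority as A, so the chosen parent
--     # at every cell is identical and the emitted strings coincide.
--     def align(a, b):
--         prev = [(0, "-" * j, b[:j]) for j in range(len(b) + 1)]
--         for i, x in enumerate(a, 1):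
--             cur = [(0, a[:i], "-" * i)]
--             for j, c in enumerate(b, 1):
--                 ds, da, db = prev[j]
--                 best = (ds - 2, da + x, db + "-")
--                 s, sa, sb = cur[j - 1]
--                 if s - 2 > best[0]:
--                     best = (s - 2, sa + "-", sb + c)
--                 ms, ma, mb = prev[j - 1]
--                 m = ms + (2 if x == c else -1)
--                 if m > best[0]:
--                     best = (m, ma + x, mb + c)
--                 cur.append(best)
--             prev = cur
--         return prev[-1][1], prev[-1][2]
--
--     alignedS1 = ""
--     alignedS2 = ""
--     startIndex1 = 0
--     startIndex2 = 0
--     for mum in MUMs: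
--         (part1, part2) = align(S1[startIndex1:mum[1]], S2[startIndex2:mum[2]])
--         alignedS1 += part1 + " [ " + S1[mum[1]:mum[1] + mum[0]] + " ] "
--         alignedS2 += part2 + " [ " + S2[mum[2]:mum[2] + mum[0]] + " ] "
--         startIndex1 = mum[1] + mum[0]
--         startIndex2 = mum[2] + mum[0]
--     (part1, part2) = align(S1[startIndex1:], S2[startIndex2:])
--     alignedS1 += part1
--     alignedS2 += part2
--     return (alignedS1, alignedS2)
-- ===== Notes on version B (the rewrite author's own statement) =====
-- stated objective: alternative
-- what changed: A's two-phase SmithWaterman (fill a dp score matrix plus a path matrix, then a separate traceback walk over the path matrix) is replaced by a single forward DP pass whose cell values are (score, aligned_a, aligned_b) triples, so the aligned strings are built during the fill and there is no path matrix and no traceback phase; the outer per-MUM loop is unchanged.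
import Mathlib
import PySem

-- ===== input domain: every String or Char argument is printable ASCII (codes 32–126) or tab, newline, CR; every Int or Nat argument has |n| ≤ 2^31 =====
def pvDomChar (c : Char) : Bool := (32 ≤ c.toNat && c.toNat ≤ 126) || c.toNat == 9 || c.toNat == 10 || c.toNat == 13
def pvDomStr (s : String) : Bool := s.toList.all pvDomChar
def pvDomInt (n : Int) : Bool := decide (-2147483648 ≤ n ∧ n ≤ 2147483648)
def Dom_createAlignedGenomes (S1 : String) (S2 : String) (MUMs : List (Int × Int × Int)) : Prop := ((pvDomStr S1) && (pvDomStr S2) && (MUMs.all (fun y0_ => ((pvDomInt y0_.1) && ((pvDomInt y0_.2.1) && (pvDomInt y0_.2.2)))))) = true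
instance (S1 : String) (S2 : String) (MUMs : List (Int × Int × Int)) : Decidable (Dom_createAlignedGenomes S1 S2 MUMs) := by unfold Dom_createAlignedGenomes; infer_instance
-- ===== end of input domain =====

-- B replaces A's two-phase Smith-Waterman (fill dp + path matrices, then a traceback walk)
-- by a single forward DP pass whose cell values are (score, aligned_a, aligned_b) triples,
-- so the aligned strings are built during the fill and no path matrix or traceback exists;
-- objective: alternative (same O(n*m) cell count, different phase structure).

-- ===== PORT A =====

-- mutationCost
def pvMutationCost (x y : Char) : Int := if x = y then 2 else -1

-- A's 2D list reads/writes dp[i][j] (all of A's indices are nonnegative and in range,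
-- so Nat indexing with a default is exact here)
def pvGet2 (mat : List (List Int)) (i j : Nat) : Int := (mat.getD i []).getD j 0
def pvSet2 (mat : List (List Int)) (i j : Nat) (v : Int) : List (List Int) :=
  mat.set i ((mat.getD i []).set j v)
def pvSet2P (mat : List (List (Int × Int))) (i j : Nat) (v : Int × Int) : List (List (Int × Int)) :=
  mat.set i ((mat.getD i []).set j v)

-- body of A's inner loop at indices (i, j)
def pvSWStep (a b : List Char) (st : List (List Int) × List (List (Int × Int))) (i j : Nat) :
    List (List Int) × List (List (Int × Int)) :=
  let dp := st.1
  let path := st.2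
  let deletion := pvGet2 dp (i - 1) j + (-2)
  let dp := pvSet2 dp i j deletion
  let path := pvSet2P path i j (-1, 0)
  let insertion := pvGet2 dp i (j - 1) + (-2)
  let st1 := if insertion > pvGet2 dp i j then (pvSet2 dp i j insertion, pvSet2P path i j (0, -1)) else (dp, path)
  let dp := st1.1
  let path := st1.2
  let mutation := pvGet2 dp (i - 1) (j - 1) + pvMutationCost (a.getD (i - 1) '-') (b.getD (j - 1) '-')
  if mutation > pvGet2 dp i j then (pvSet2 dp i j mutation, pvSet2P path i j (-1, -1)) else (dp, path)

-- the matrix-building part of A's SmithWaterman; 'for i in range(1, n+1)' is ported as a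
-- fold over List.range n with i = i0 + 1 (the indices are nonnegative Nats)
def pvSWFill (a b : List Char) : List (List Int) × List (List (Int × Int)) :=
  let n := a.length
  let m := b.length
  let dp0 : List (List Int) := List.replicate (n + 1) (List.replicate (m + 1) 0)
  let path0 : List (List (Int × Int)) := List.replicate (n + 1) (List.replicate (m + 1) (0, 0))
  let path1 := (List.range n).foldl (fun p i0 => pvSet2P p (i0 + 1) 0 (-1, 0)) path0
  let path2 := (List.range m).foldl (fun p j0 => pvSet2P p 0 (j0 + 1) (0, -1)) path1
  (List.range n).foldl
    (fun st i0 => (List.range m).foldl (fun st j0 => pvSWStep a b st (i0 + 1) (j0 + 1)) st)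
    (dp0, path2)

-- A's 'while position != (0,0)' reconstruction loop; position is an Int pair exactly as in
-- Python, matrix/string indexing uses pyGetD (Python indexing); fuel bounds the iteration
-- count — the loop performs at most len(a)+len(b) iterations on the matrices pvSWFill
-- builds (each step moves position strictly towards (0,0)), so the fuel below never runs out
def pvRecon (a b : List Char) (path : List (List (Int × Int))) :
    Nat → Int × Int → List Char × List Char → List Char × List Char
  | 0, _, acc => acc
  | fuel + 1, pos, (aa, bb) =>
    if pos = (0, 0) then (aa, bb)
    else
      let dir := PySem.List.pyGetD (PySem.List.pyGetD path pos.1 []) pos.2 (0, 0)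
      let aa' := (if dir.1 = -1 then PySem.List.pyGetD a (pos.1 - 1) '-' else '-') :: aa
      let bb' := (if dir.2 = -1 then PySem.List.pyGetD b (pos.2 - 1) '-' else '-') :: bb
      pvRecon a b path fuel (pos.1 + dir.1, pos.2 + dir.2) (aa', bb')

def pvSmithWatermanA (a b : List Char) : List Char × List Char :=
  let path := (pvSWFill a b).2
  pvRecon a b path (a.length + b.length + 1) ((a.length : Int), (b.length : Int)) ([], [])

def createAlignedGenomes (S1 : String) (S2 : String) (MUMs : List (Int × Int × Int)) : String × String :=
  let s1 := S1.toList
  let s2 := S2.toList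
  let lb : List Char := [' ', '[', ' ']
  let rb : List Char := [' ', ']', ' ']
  let st := MUMs.foldl
    (fun (st : List Char × List Char × Int × Int) mum =>
      let pr := pvSmithWatermanA (PySem.List.slice s1 (some st.2.2.1) (some mum.2.1))
                                 (PySem.List.slice s2 (some st.2.2.2) (some mum.2.2))
      (st.1 ++ pr.1 ++ lb ++ PySem.List.slice s1 (some mum.2.1) (some (mum.2.1 + mum.1)) ++ rb,
       st.2.1 ++ pr.2 ++ lb ++ PySem.List.slice s2 (some mum.2.2) (some (mum.2.2 + mum.1)) ++ rb,
       mum.2.1 + mum.1, mum.2.2 + mum.1))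
    ([], [], 0, 0)
  let pr := pvSmithWatermanA (PySem.List.slice s1 (some st.2.2.1) none)
                             (PySem.List.slice s2 (some st.2.2.2) none)
  (String.ofList (st.1 ++ pr.1), String.ofList (st.2.1 ++ pr.2))

-- ===== PORT B =====

-- B's inner-loop body at enumerate pair cj = (j, c): choose among deletion / insertion /
-- mutation parent triples with the same strict-override priority, append the chosen cell
def pvCellB (prev cur : List (Int × List Char × List Char)) (x : Char) (cj : Int × Char) :
    List (Int × List Char × List Char) :=
  let dd := PySem.List.pyGetD prev cj.1 (0, [], [])
  let best := (dd.1 - 2, dd.2.1 ++ [x], dd.2.2 ++ ['-'])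
  let s := PySem.List.pyGetD cur (cj.1 - 1) (0, [], [])
  let best := if s.1 - 2 > best.1 then (s.1 - 2, s.2.1 ++ ['-'], s.2.2 ++ [cj.2]) else best
  let m := PySem.List.pyGetD prev (cj.1 - 1) (0, [], [])
  let ms := m.1 + (if x = cj.2 then 2 else -1)
  let best := if ms > best.1 then (ms, m.2.1 ++ [x], m.2.2 ++ [cj.2]) else best
  cur ++ [best]

-- Source B's align: border row of (0, "-"*j, b[:j]) triples, then one forward pass over
-- enumerate(a, 1) × enumerate(b, 1) building each row from the previous; answer = prev[-1]
def pvAlignB (a b : List Char) : List Char × List Char :=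
  let prev0 := (PySem.List.pyRange 0 ((b.length : Int) + 1) 1).map
      (fun j => ((0 : Int), List.replicate j.toNat '-', PySem.List.slice b none (some j)))
  let prev := (PySem.List.enumerate a 1).foldl
    (fun prev xi =>
      (PySem.List.enumerate b 1).foldl (fun cur cj => pvCellB prev cur xi.2 cj)
        [((0 : Int), PySem.List.slice a none (some xi.1), List.replicate xi.1.toNat '-')])
    prev0
  let last := PySem.List.pyGetD prev (-1) ((0 : Int), [], [])
  (last.2.1, last.2.2)

def createAlignedGenomes_alt (S1 : String) (S2 : String) (MUMs : List (Int × Int × Int)) : String × String :=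
  let s1 := S1.toList
  let s2 := S2.toList
  let lb : List Char := [' ', '[', ' ']
  let rb : List Char := [' ', ']', ' ']
  let st := MUMs.foldl
    (fun (st : List Char × List Char × Int × Int) mum =>
      let pr := pvAlignB (PySem.List.slice s1 (some st.2.2.1) (some mum.2.1))
                         (PySem.List.slice s2 (some st.2.2.2) (some mum.2.2))
      (st.1 ++ pr.1 ++ lb ++ PySem.List.slice s1 (some mum.2.1) (some (mum.2.1 + mum.1)) ++ rb,
       st.2.1 ++ pr.2 ++ lb ++ PySem.List.slice s2 (some mum.2.2) (some (mum.2.2 + mum.1)) ++ rb,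
       mum.2.1 + mum.1, mum.2.2 + mum.1))
    ([], [], 0, 0)
  let pr := pvAlignB (PySem.List.slice s1 (some st.2.2.1) none)
                     (PySem.List.slice s2 (some st.2.2.2) none)
  (String.ofList (st.1 ++ pr.1), String.ofList (st.2.1 ++ pr.2))

-- ===== PRECONDITION & SPEC =====
def Spec_createAlignedGenomes (S1 : String) (S2 : String) (MUMs : List (Int × Int × Int)) (out : String × String) : Prop := out = createAlignedGenomes_alt S1 S2 MUMs
instance (S1 : String) (S2 : String) (MUMs : List (Int × Int × Int)) (out : String × String) : Decidable (Spec_createAlignedGenomes S1 S2 MUMs out) := by unfold Spec_createAlignedGenomes; infer_instance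

-- ===== CLAIM (what is proved, stated in full; the proofs are below) =====
def Claim_equal_createAlignedGenomes : Prop := ∀ (S1 : String) (S2 : String) (MUMs : List (Int × Int × Int)), Dom_createAlignedGenomes S1 S2 MUMs → Spec_createAlignedGenomes S1 S2 MUMs (createAlignedGenomes S1 S2 MUMs)

-- ===== LEMMAS AND PROOFS =====

/- The canonical DP score table of both programs. -/
def pvD (a b : List Char) : Nat → Nat → Int
  | 0, _ => 0
  | _ + 1, 0 => 0
  | i + 1, j + 1 =>
    let del := pvD a b i (j + 1) - 2
    let ins := pvD a b (i + 1) j - 2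
    let muta := pvD a b i j + pvMutationCost (a.getD i '-') (b.getD j '-')
    let v := if ins > del then ins else del
    if muta > v then muta else v
  termination_by i j => i + j

/- A's stored traceback direction. -/
def pvPdir (a b : List Char) : Nat → Nat → Int × Int
  | 0, 0 => (0, 0)
  | _ + 1, 0 => (-1, 0)
  | 0, _ + 1 => (0, -1)
  | i + 1, j + 1 =>
    let del := pvD a b i (j + 1) - 2
    let ins := pvD a b (i + 1) j - 2
    let muta := pvD a b i j + pvMutationCost (a.getD i '-') (b.getD j '-')
    if muta > (if ins > del then ins else del) then (-1, -1)
    else if ins > del then (0, -1) else (-1, 0)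

/- The two emitted alignment-row character lists, in traceback visit order. -/
def pvChars (a b : List Char) : Nat → Nat → List Char × List Char
  | 0, 0 => ([], [])
  | i + 1, 0 => ((a.getD i '-') :: (pvChars a b i 0).1, '-' :: (pvChars a b i 0).2)
  | 0, j + 1 => ('-' :: (pvChars a b 0 j).1, (b.getD j '-') :: (pvChars a b 0 j).2)
  | i + 1, j + 1 =>
    let d := pvPdir a b (i + 1) (j + 1)
    if d = (-1, -1) then ((a.getD i '-') :: (pvChars a b i j).1, (b.getD j '-') :: (pvChars a b i j).2)
    else if d = (0, -1) then ('-' :: (pvChars a b (i + 1) j).1, (b.getD j '-') :: (pvChars a b (i + 1) j).2)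
    else ((a.getD i '-') :: (pvChars a b i (j + 1)).1, '-' :: (pvChars a b i (j + 1)).2)
  termination_by i j => i + j

/- Matrices as maps over index rectangles. -/
def pvMat {α : Type} (n m : Nat) (f : Nat → Nat → α) : List (List α) :=
  (List.range n).map (fun r => (List.range m).map (f r))

theorem pvMat_congr {α : Type} (n m : Nat) (f g : Nat → Nat → α)
    (h : ∀ r c, r < n → c < m → f r c = g r c) : pvMat n m f = pvMat n m g := by
  unfold pvMat
  apply List.ext_getElem (by simp)
  intro r h1 h2
  simp only [List.getElem_map, List.getElem_range]
  apply List.ext_getElem (by simp)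
  intro c h3 h4
  simp only [List.getElem_map, List.getElem_range]
  exact h r c (by simpa using h1) (by simpa using h3)

theorem pvMat_getD {α : Type} (n m : Nat) (f : Nat → Nat → α) (i : Nat) (hi : i < n) :
    (pvMat n m f).getD i [] = (List.range m).map (f i) := by
  unfold pvMat
  rw [List.getD_eq_getElem _ _ (by simpa using hi)]
  simp

theorem pvMat_get {α : Type} (n m : Nat) (f : Nat → Nat → α) (i j : Nat) (d : α)
    (hi : i < n) (hj : j < m) : ((pvMat n m f).getD i []).getD j d = f i j := by
  rw [pvMat_getD n m f i hi, List.getD_eq_getElem _ _ (by simpa using hj)]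
  simp

theorem pvMat_set {α : Type} (n m : Nat) (f : Nat → Nat → α) (i j : Nat) (v : α)
    (hi : i < n) (hj : j < m) :
    (pvMat n m f).set i (((pvMat n m f).getD i []).set j v)
      = pvMat n m (fun r c => if r = i ∧ c = j then v else f r c) := by
  rw [pvMat_getD n m f i hi]
  unfold pvMat
  apply List.ext_getElem (by simp)
  intro r hr1 hr2
  have hrn : r < n := by simpa using hr2
  rw [List.getElem_set, List.getElem_map, List.getElem_range]
  split
  · next h =>
    -- row i is the pointwise-updated row
    subst h
    apply List.ext_getElem (by simp)
    intro c hc1 hc2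
    have hcm : c < m := by simpa using hc2
    simp only [List.getElem_set, List.getElem_map, List.getElem_range]
    by_cases h2 : c = j
    · simp [h2]
    · rw [if_neg (Ne.symm h2), if_neg (by simp [h2])]
  · next h =>
    -- other rows unchanged
    simp only [List.getElem_map, List.getElem_range]
    apply List.map_congr_left
    intro c _
    rw [if_neg (by omega)]

theorem pvD_zero_left (a b : List Char) (j : Nat) : pvD a b 0 j = 0 := by
  simp [pvD]

theorem pvD_zero_right (a b : List Char) (i : Nat) : pvD a b i 0 = 0 := by
  cases i <;> simp [pvD]

theorem pvD_succ (a b : List Char) (i j : Nat) :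
    pvD a b (i + 1) (j + 1) =
      (if (pvD a b i j + pvMutationCost (a.getD i '-') (b.getD j '-')) >
          (if (pvD a b (i + 1) j - 2) > (pvD a b i (j + 1) - 2) then (pvD a b (i + 1) j - 2)
           else (pvD a b i (j + 1) - 2))
       then (pvD a b i j + pvMutationCost (a.getD i '-') (b.getD j '-'))
       else (if (pvD a b (i + 1) j - 2) > (pvD a b i (j + 1) - 2) then (pvD a b (i + 1) j - 2)
             else (pvD a b i (j + 1) - 2))) := by
  rw [pvD]

theorem pvPdir_succ (a b : List Char) (i j : Nat) :
    pvPdir a b (i + 1) (j + 1) =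
      (if (pvD a b i j + pvMutationCost (a.getD i '-') (b.getD j '-')) >
          (if (pvD a b (i + 1) j - 2) > (pvD a b i (j + 1) - 2) then (pvD a b (i + 1) j - 2)
           else (pvD a b i (j + 1) - 2))
       then ((-1 : Int), (-1 : Int))
       else if (pvD a b (i + 1) j - 2) > (pvD a b i (j + 1) - 2) then ((0 : Int), (-1 : Int))
            else ((-1 : Int), (0 : Int))) := by
  rw [pvPdir]

theorem pvChars_succ (a b : List Char) (i j : Nat) :
    pvChars a b (i + 1) (j + 1) =
      (let d := pvPdir a b (i + 1) (j + 1)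
       if d = (-1, -1) then ((a.getD i '-') :: (pvChars a b i j).1, (b.getD j '-') :: (pvChars a b i j).2)
       else if d = (0, -1) then ('-' :: (pvChars a b (i + 1) j).1, (b.getD j '-') :: (pvChars a b (i + 1) j).2)
       else ((a.getD i '-') :: (pvChars a b i (j + 1)).1, '-' :: (pvChars a b i (j + 1)).2)) := by
  rw [pvChars]

/- dp/path contents after A has processed rows 1..t fully and, in row t+1, columns 1..s. -/
def pvDpF (a b : List Char) (t s : Nat) : Nat → Nat → Int := fun r c =>
  if r ≤ t ∨ (r = t + 1 ∧ c ≤ s) then pvD a b r c else 0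

def pvPF (a b : List Char) (t s : Nat) : Nat → Nat → Int × Int := fun r c =>
  if r ≤ t ∨ c = 0 ∨ (r = t + 1 ∧ 1 ≤ c ∧ c ≤ s) then pvPdir a b r c else (0, 0)

theorem pvCell (a b : List Char) (t s : Nat) (ht : t < a.length) (hs : s < b.length) :
    pvSWStep a b
      (pvMat (a.length + 1) (b.length + 1) (pvDpF a b t s),
       pvMat (a.length + 1) (b.length + 1) (pvPF a b t s)) (t + 1) (s + 1)
    = (pvMat (a.length + 1) (b.length + 1) (pvDpF a b t (s + 1)),
       pvMat (a.length + 1) (b.length + 1) (pvPF a b t (s + 1))) := by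
  have eA : pvDpF a b t s t (s + 1) = pvD a b t (s + 1) := by
    unfold pvDpF; rw [if_pos (by omega)]
  have eB : pvDpF a b t s (t + 1) s = pvD a b (t + 1) s := by
    unfold pvDpF; rw [if_pos (by omega)]
  have eC : pvDpF a b t s t s = pvD a b t s := by
    unfold pvDpF; rw [if_pos (by omega)]
  have hss : ¬(s = s + 1) := by omega
  unfold pvSWStep pvGet2 pvSet2 pvSet2P
  dsimp only
  simp only [Nat.add_sub_cancel]
  repeat rw [pvMat_set (hi := by omega) (hj := by omega)]
  repeat rw [pvMat_get (hi := by omega) (hj := by omega)]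
  simp only [hss, eq_self_iff_true, true_and, and_true, and_false, if_true, if_false]
  rw [eA, eB]
  have htt : ¬(t = t + 1) := by omega
  by_cases h1 : pvD a b (t + 1) s + -2 > pvD a b t (s + 1) + -2
  · simp only [if_pos h1]
    repeat rw [pvMat_set (hi := by omega) (hj := by omega)]
    repeat rw [pvMat_get (hi := by omega) (hj := by omega)]
    simp only [htt, hss, false_and, and_false, eq_self_iff_true, true_and, and_true, if_true,
      if_false]
    rw [eC]
    by_cases h2 : pvD a b t s + pvMutationCost (a.getD t '-') (b.getD s '-') > pvD a b (t + 1) s + -2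
    · simp only [if_pos h2]
      rw [Prod.mk.injEq]
      refine ⟨pvMat_congr _ _ _ _ ?_, pvMat_congr _ _ _ _ ?_⟩
      · intro r c hr hc
        by_cases hrc : r = t + 1 ∧ c = s + 1
        · obtain ⟨hr1, hc1⟩ := hrc
          subst hr1; subst hc1
          simp only [and_self, if_true, eq_self_iff_true, pvDpF]
          rw [if_pos (show t + 1 ≤ t ∨ True ∧ s + 1 ≤ s + 1 by simp), pvD_succ]
          split_ifs <;> omega
        · simp only [if_neg hrc, pvDpF]
          split_ifs <;> first | rfl | (exfalso; omega)
      · intro r c hr hc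
        by_cases hrc : r = t + 1 ∧ c = s + 1
        · obtain ⟨hr1, hc1⟩ := hrc
          subst hr1; subst hc1
          simp only [and_self, if_true, eq_self_iff_true, pvPF]
          rw [if_pos (show t + 1 ≤ t ∨ s + 1 = 0 ∨ True ∧ 1 ≤ s + 1 ∧ s + 1 ≤ s + 1 by simp), pvPdir_succ]
          split_ifs <;> first | rfl | (exfalso; omega)
        · simp only [if_neg hrc, pvPF]
          split_ifs <;> first | rfl | (exfalso; omega)
    · simp only [if_neg h2]
      rw [Prod.mk.injEq]
      refine ⟨pvMat_congr _ _ _ _ ?_, pvMat_congr _ _ _ _ ?_⟩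
      · intro r c hr hc
        by_cases hrc : r = t + 1 ∧ c = s + 1
        · obtain ⟨hr1, hc1⟩ := hrc
          subst hr1; subst hc1
          simp only [and_self, if_true, eq_self_iff_true, pvDpF]
          rw [if_pos (show t + 1 ≤ t ∨ True ∧ s + 1 ≤ s + 1 by simp), pvD_succ]
          split_ifs <;> omega
        · simp only [if_neg hrc, pvDpF]
          split_ifs <;> first | rfl | (exfalso; omega)
      · intro r c hr hc
        by_cases hrc : r = t + 1 ∧ c = s + 1
        · obtain ⟨hr1, hc1⟩ := hrc
          subst hr1; subst hc1
          simp only [and_self, if_true, eq_self_iff_true, pvPF]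
          rw [if_pos (show t + 1 ≤ t ∨ s + 1 = 0 ∨ True ∧ 1 ≤ s + 1 ∧ s + 1 ≤ s + 1 by simp), pvPdir_succ]
          split_ifs <;> first | rfl | (exfalso; omega)
        · simp only [if_neg hrc, pvPF]
          split_ifs <;> first | rfl | (exfalso; omega)
  · simp only [if_neg h1]
    repeat rw [pvMat_set (hi := by omega) (hj := by omega)]
    repeat rw [pvMat_get (hi := by omega) (hj := by omega)]
    simp only [htt, hss, false_and, and_false, eq_self_iff_true, true_and, and_true, if_true,
      if_false]
    rw [eC]
    by_cases h2 : pvD a b t s + pvMutationCost (a.getD t '-') (b.getD s '-') > pvD a b t (s + 1) + -2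
    · simp only [if_pos h2]
      rw [Prod.mk.injEq]
      refine ⟨pvMat_congr _ _ _ _ ?_, pvMat_congr _ _ _ _ ?_⟩
      · intro r c hr hc
        by_cases hrc : r = t + 1 ∧ c = s + 1
        · obtain ⟨hr1, hc1⟩ := hrc
          subst hr1; subst hc1
          simp only [and_self, if_true, eq_self_iff_true, pvDpF]
          rw [if_pos (show t + 1 ≤ t ∨ True ∧ s + 1 ≤ s + 1 by simp), pvD_succ]
          split_ifs <;> omega
        · simp only [if_neg hrc, pvDpF]
          split_ifs <;> first | rfl | (exfalso; omega)
      · intro r c hr hc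
        by_cases hrc : r = t + 1 ∧ c = s + 1
        · obtain ⟨hr1, hc1⟩ := hrc
          subst hr1; subst hc1
          simp only [and_self, if_true, eq_self_iff_true, pvPF]
          rw [if_pos (show t + 1 ≤ t ∨ s + 1 = 0 ∨ True ∧ 1 ≤ s + 1 ∧ s + 1 ≤ s + 1 by simp), pvPdir_succ]
          split_ifs <;> first | rfl | (exfalso; omega)
        · simp only [if_neg hrc, pvPF]
          split_ifs <;> first | rfl | (exfalso; omega)
    · simp only [if_neg h2]
      rw [Prod.mk.injEq]
      refine ⟨pvMat_congr _ _ _ _ ?_, pvMat_congr _ _ _ _ ?_⟩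
      · intro r c hr hc
        by_cases hrc : r = t + 1 ∧ c = s + 1
        · obtain ⟨hr1, hc1⟩ := hrc
          subst hr1; subst hc1
          simp only [and_self, if_true, eq_self_iff_true, pvDpF]
          rw [if_pos (show t + 1 ≤ t ∨ True ∧ s + 1 ≤ s + 1 by simp), pvD_succ]
          split_ifs <;> omega
        · simp only [if_neg hrc, pvDpF]
          split_ifs <;> first | rfl | (exfalso; omega)
      · intro r c hr hc
        by_cases hrc : r = t + 1 ∧ c = s + 1
        · obtain ⟨hr1, hc1⟩ := hrc
          subst hr1; subst hc1
          simp only [and_self, if_true, eq_self_iff_true, pvPF]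
          rw [if_pos (show t + 1 ≤ t ∨ s + 1 = 0 ∨ True ∧ 1 ≤ s + 1 ∧ s + 1 ≤ s + 1 by simp), pvPdir_succ]
          split_ifs <;> first | rfl | (exfalso; omega)
        · simp only [if_neg hrc, pvPF]
          split_ifs <;> first | rfl | (exfalso; omega)

theorem pvReplicate_eq {α : Type} (n m : Nat) (x : α) :
    List.replicate n (List.replicate m x) = pvMat n m (fun _ _ => x) := by
  apply List.ext_getElem (by simp [pvMat])
  intro r h1 h2
  simp only [List.getElem_replicate, pvMat, List.getElem_map, List.getElem_range]
  apply List.ext_getElem (by simp)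
  intro c h3 h4
  simp

theorem pvEdgeA (a b : List Char) : ∀ t, t ≤ a.length →
    (List.range t).foldl (fun p i0 => pvSet2P p (i0 + 1) 0 (-1, 0))
      (pvMat (a.length + 1) (b.length + 1) (fun _ _ => ((0 : Int), (0 : Int))))
    = pvMat (a.length + 1) (b.length + 1)
        (fun r c => if 1 ≤ r ∧ r ≤ t ∧ c = 0 then (-1, 0) else (0, 0)) := by
  intro t ht
  induction t with
  | zero =>
    simp only [List.range_zero, List.foldl_nil]
    apply pvMat_congr
    intro r c _ _
    rw [if_neg (by omega)]
  | succ t ih =>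
    rw [List.range_succ, List.foldl_append, ih (by omega)]
    simp only [List.foldl_cons, List.foldl_nil]
    unfold pvSet2P
    rw [pvMat_set (hi := by omega) (hj := by omega)]
    apply pvMat_congr
    intro r c hr hc
    split_ifs <;> first | rfl | (exfalso; omega)

theorem pvEdgeB (a b : List Char) : ∀ t, t ≤ b.length →
    (List.range t).foldl (fun p j0 => pvSet2P p 0 (j0 + 1) (0, -1))
      (pvMat (a.length + 1) (b.length + 1)
        (fun r c => if 1 ≤ r ∧ r ≤ a.length ∧ c = 0 then (-1, 0) else (0, 0)))
    = pvMat (a.length + 1) (b.length + 1)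
        (fun r c => if r = 0 ∧ 1 ≤ c ∧ c ≤ t then (0, -1)
          else if 1 ≤ r ∧ r ≤ a.length ∧ c = 0 then (-1, 0) else (0, 0)) := by
  intro t ht
  induction t with
  | zero =>
    simp only [List.range_zero, List.foldl_nil]
    apply pvMat_congr
    intro r c _ _
    split_ifs <;> first | rfl | (exfalso; omega)
  | succ t ih =>
    rw [List.range_succ, List.foldl_append, ih (by omega)]
    simp only [List.foldl_cons, List.foldl_nil]
    unfold pvSet2P
    rw [pvMat_set (hi := by omega) (hj := by omega)]
    apply pvMat_congr
    intro r c hr hc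
    split_ifs <;> first | rfl | (exfalso; omega)

theorem pvPathInit (a b : List Char) :
    pvMat (a.length + 1) (b.length + 1)
      (fun r c => if r = 0 ∧ 1 ≤ c ∧ c ≤ b.length then (0, -1)
        else if 1 ≤ r ∧ r ≤ a.length ∧ c = 0 then (-1, 0) else (0, 0))
    = pvMat (a.length + 1) (b.length + 1) (pvPF a b 0 0) := by
  apply pvMat_congr
  intro r c hr hc
  simp only [pvPF]
  rcases r with _ | r <;> rcases c with _ | c
  · simp [pvPdir]
  · rw [if_pos ⟨rfl, by omega, by omega⟩, if_pos (by omega)]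
    simp [pvPdir]
  · rw [if_neg (by omega), if_pos ⟨by omega, by omega, rfl⟩, if_pos (by omega)]
    simp [pvPdir]
  · rw [if_neg (by omega), if_neg (by omega), if_neg (by omega)]

theorem pvInner (a b : List Char) (t : Nat) (ht : t < a.length) : ∀ s, s ≤ b.length →
    (List.range s).foldl (fun st j0 => pvSWStep a b st (t + 1) (j0 + 1))
      (pvMat (a.length + 1) (b.length + 1) (pvDpF a b t 0),
       pvMat (a.length + 1) (b.length + 1) (pvPF a b t 0))
    = (pvMat (a.length + 1) (b.length + 1) (pvDpF a b t s),
       pvMat (a.length + 1) (b.length + 1) (pvPF a b t s)) := by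
  intro s hs
  induction s with
  | zero => simp
  | succ s ih =>
    rw [List.range_succ, List.foldl_append, ih (by omega)]
    simpa using pvCell a b t s ht (by omega)

theorem pvOuter (a b : List Char) : ∀ t, t ≤ a.length →
    (List.range t).foldl
      (fun st i0 => (List.range b.length).foldl (fun st j0 => pvSWStep a b st (i0 + 1) (j0 + 1)) st)
      (pvMat (a.length + 1) (b.length + 1) (pvDpF a b 0 0),
       pvMat (a.length + 1) (b.length + 1) (pvPF a b 0 0))
    = (pvMat (a.length + 1) (b.length + 1) (pvDpF a b t 0),
       pvMat (a.length + 1) (b.length + 1) (pvPF a b t 0)) := by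
  intro t ht
  induction t with
  | zero => simp
  | succ t ih =>
    rw [List.range_succ, List.foldl_append, ih (by omega)]
    simp only [List.foldl_cons, List.foldl_nil]
    rw [pvInner a b t (by omega) b.length (le_refl _)]
    rw [Prod.mk.injEq]
    constructor
    · apply pvMat_congr
      intro r c hr hc
      simp only [pvDpF]
      split_ifs with hA hB hC
      · rfl
      · exfalso; omega
      · have hc0 : c = 0 := by omega
        subst hc0
        rw [pvD_zero_right]
      · rfl
    · apply pvMat_congr
      intro r c hr hc
      simp only [pvPF]
      split_ifs <;> first | rfl | (exfalso; omega)

theorem pvSWFill_eq (a b : List Char) :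
    pvSWFill a b
    = (pvMat (a.length + 1) (b.length + 1) (fun r c => pvD a b r c),
       pvMat (a.length + 1) (b.length + 1) (fun r c => pvPdir a b r c)) := by
  unfold pvSWFill
  dsimp only
  rw [pvReplicate_eq, pvReplicate_eq, pvEdgeA a b a.length (le_refl _),
    pvEdgeB a b b.length (le_refl _), pvPathInit]
  have hdp0 : pvMat (a.length + 1) (b.length + 1) (fun _ _ => (0 : Int))
      = pvMat (a.length + 1) (b.length + 1) (pvDpF a b 0 0) := by
    apply pvMat_congr
    intro r c hr hc
    simp only [pvDpF]
    split_ifs with h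
    · rcases h with h | ⟨h1, h2⟩
      · have hr0 : r = 0 := by omega
        subst hr0
        rw [pvD_zero_left]
      · have hc0 : c = 0 := by omega
        subst hc0
        rw [pvD_zero_right]
    · rfl
  rw [hdp0, pvOuter a b a.length (le_refl _)]
  rw [Prod.mk.injEq]
  constructor
  · apply pvMat_congr
    intro r c hr hc
    simp only [pvDpF]
    rw [if_pos (by omega)]
  · apply pvMat_congr
    intro r c hr hc
    simp only [pvPF]
    rw [if_pos (by omega)]

theorem pvRecon_eq (a b : List Char) :
    ∀ fuel (i j : Nat), i + j ≤ fuel → i ≤ a.length → j ≤ b.length → ∀ aa bb,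
      pvRecon a b (pvMat (a.length + 1) (b.length + 1) (fun r c => pvPdir a b r c)) fuel
        ((i : Int), (j : Int)) (aa, bb)
      = ((pvChars a b i j).1.reverse ++ aa, (pvChars a b i j).2.reverse ++ bb) := by
  intro fuel
  induction fuel with
  | zero =>
    intro i j hf _ _ aa bb
    have hi0 : i = 0 := by omega
    have hj0 : j = 0 := by omega
    subst hi0; subst hj0
    simp [pvRecon, pvChars]
  | succ fuel ih =>
    intro i j hf hi hj aa bb
    rcases i with _ | i <;> rcases j with _ | j
    · simp [pvRecon, pvChars]
    · -- (0, j+1): move left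
      simp only [pvRecon]
      rw [if_neg (by simp; omega)]
      simp only [PySem.List.pyGetD_natCast]
      rw [pvMat_get (hi := by omega) (hj := by omega)]
      rw [show pvPdir a b 0 (j + 1) = (0, -1) from rfl]
      dsimp only
      rw [if_neg (by norm_num), if_pos rfl]
      rw [show ((j + 1 : Nat) : Int) - 1 = ((j : Nat) : Int) by push_cast; ring]
      rw [PySem.List.pyGetD_natCast]
      rw [show ((0 : Nat) : Int) + 0 = ((0 : Nat) : Int) by simp,
        show ((j + 1 : Nat) : Int) + -1 = ((j : Nat) : Int) by push_cast; ring]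
      rw [ih 0 j (by omega) (by omega) (by omega)]
      simp [pvChars]
    · -- (i+1, 0): move up
      simp only [pvRecon]
      rw [if_neg (by simp; omega)]
      simp only [PySem.List.pyGetD_natCast]
      rw [pvMat_get (hi := by omega) (hj := by omega)]
      rw [show pvPdir a b (i + 1) 0 = (-1, 0) from rfl]
      dsimp only
      rw [if_pos rfl, if_neg (by norm_num)]
      rw [show ((i + 1 : Nat) : Int) - 1 = ((i : Nat) : Int) by push_cast; ring]
      rw [PySem.List.pyGetD_natCast]
      rw [show ((i + 1 : Nat) : Int) + -1 = ((i : Nat) : Int) by push_cast; ring,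
        show ((0 : Nat) : Int) + 0 = ((0 : Nat) : Int) by simp]
      rw [ih i 0 (by omega) (by omega) (by omega)]
      simp [pvChars]
    · -- interior
      simp only [pvRecon]
      rw [if_neg (by simp; omega)]
      simp only [PySem.List.pyGetD_natCast]
      rw [pvMat_get (hi := by omega) (hj := by omega)]
      by_cases hC1 : pvD a b i j + pvMutationCost (a.getD i '-') (b.getD j '-') >
          (if pvD a b (i + 1) j - 2 > pvD a b i (j + 1) - 2 then pvD a b (i + 1) j - 2
           else pvD a b i (j + 1) - 2)
      · have hdir : pvPdir a b (i + 1) (j + 1) = (-1, -1) := by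
          rw [pvPdir_succ, if_pos hC1]
        rw [hdir]
        dsimp only
        rw [if_pos rfl, if_pos rfl]
        rw [show ((i + 1 : Nat) : Int) - 1 = ((i : Nat) : Int) by push_cast; ring,
          show ((j + 1 : Nat) : Int) - 1 = ((j : Nat) : Int) by push_cast; ring]
        rw [PySem.List.pyGetD_natCast, PySem.List.pyGetD_natCast]
        rw [show ((i + 1 : Nat) : Int) + -1 = ((i : Nat) : Int) by push_cast; ring,
          show ((j + 1 : Nat) : Int) + -1 = ((j : Nat) : Int) by push_cast; ring]
        rw [ih i j (by omega) (by omega) (by omega)]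
        simp [pvChars, hdir]
      · by_cases hC2 : pvD a b (i + 1) j - 2 > pvD a b i (j + 1) - 2
        · have hdir : pvPdir a b (i + 1) (j + 1) = (0, -1) := by
            rw [pvPdir_succ, if_neg hC1, if_pos hC2]
          rw [hdir]
          dsimp only
          rw [if_neg (by norm_num), if_pos rfl]
          rw [show ((j + 1 : Nat) : Int) - 1 = ((j : Nat) : Int) by push_cast; ring]
          rw [PySem.List.pyGetD_natCast]
          rw [show ((i + 1 : Nat) : Int) + 0 = ((i + 1 : Nat) : Int) by ring,
            show ((j + 1 : Nat) : Int) + -1 = ((j : Nat) : Int) by push_cast; ring]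
          rw [ih (i + 1) j (by omega) (by omega) (by omega)]
          simp [pvChars, hdir]
        · have hdir : pvPdir a b (i + 1) (j + 1) = (-1, 0) := by
            rw [pvPdir_succ, if_neg hC1, if_neg hC2]
          rw [hdir]
          dsimp only
          rw [if_pos rfl, if_neg (by norm_num)]
          rw [show ((i + 1 : Nat) : Int) - 1 = ((i : Nat) : Int) by push_cast; ring]
          rw [PySem.List.pyGetD_natCast]
          rw [show ((i + 1 : Nat) : Int) + -1 = ((i : Nat) : Int) by push_cast; ring,
            show ((j + 1 : Nat) : Int) + 0 = ((j + 1 : Nat) : Int) by ring]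
          rw [ih i (j + 1) (by omega) (by omega) (by omega)]
          simp [pvChars, hdir]

/- B-side. pvF is the triple B's DP stores at cell (r, c). -/
def pvF (a b : List Char) (r c : Nat) : Int × List Char × List Char :=
  (pvD a b r c, (pvChars a b r c).1.reverse, (pvChars a b r c).2.reverse)

theorem pvChars_row0 (a b : List Char) : ∀ j, j ≤ b.length →
    pvChars a b 0 j = (List.replicate j '-', (b.take j).reverse) := by
  intro j
  induction j with
  | zero => intro _; simp [pvChars]
  | succ j ih =>
    intro hj
    have hjl : j < b.length := by omega
    rw [pvChars, ih (by omega)]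
    have h2 : (List.take (j + 1) b).reverse = b[j] :: (List.take j b).reverse := by
      rw [List.take_succ, List.getElem?_eq_getElem hjl]
      simp
    rw [h2]
    simp [List.getElem?_eq_getElem hjl, List.replicate_succ]

theorem pvChars_col0 (a b : List Char) : ∀ i, i ≤ a.length →
    pvChars a b i 0 = ((a.take i).reverse, List.replicate i '-') := by
  intro i
  induction i with
  | zero => intro _; simp [pvChars]
  | succ i ih =>
    intro hi
    have hil : i < a.length := by omega
    rw [pvChars, ih (by omega)]
    have h2 : (List.take (i + 1) a).reverse = a[i] :: (List.take i a).reverse := by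
      rw [List.take_succ, List.getElem?_eq_getElem hil]
      simp
    rw [h2]
    simp [List.getElem?_eq_getElem hil, List.replicate_succ]

theorem pvF_row0 (a b : List Char) (j : Nat) (hj : j ≤ b.length) :
    pvF a b 0 j = (0, List.replicate j '-', b.take j) := by
  unfold pvF
  rw [pvD_zero_left, pvChars_row0 a b j hj]
  simp

theorem pvF_col0 (a b : List Char) (i : Nat) (hi : i ≤ a.length) :
    pvF a b i 0 = (0, a.take i, List.replicate i '-') := by
  unfold pvF
  rw [pvD_zero_right, pvChars_col0 a b i hi]
  simp

theorem pvRowGet {α : Type} (n : Nat) (f : Nat → α) (i : Nat) (d : α) (hi : i < n) :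
    ((List.range n).map f).getD i d = f i := by
  rw [List.getD_eq_getElem _ _ (by simpa using hi)]
  simp

/- One B cell equals pvF at the next index. -/
theorem pvCellB_step (a b : List Char) (i j : Nat) (hi : i < a.length) (hj : j < b.length)
    (cur : List (Int × List Char × List Char))
    (hcur : cur = (List.range (j + 1)).map (fun c => pvF a b (i + 1) c)) :
    pvCellB ((List.range (b.length + 1)).map (fun c => pvF a b i c)) cur
      (a.getD i '-') (((j + 1 : Nat) : Int), b.getD j '-')
    = (List.range (j + 2)).map (fun c => pvF a b (i + 1) c) := by
  subst hcur
  unfold pvCellB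
  dsimp only
  rw [show ((j + 1 : Nat) : Int) - 1 = ((j : Nat) : Int) by push_cast; ring]
  rw [PySem.List.pyGetD_natCast, PySem.List.pyGetD_natCast, PySem.List.pyGetD_natCast]
  rw [pvRowGet _ _ _ _ (by omega), pvRowGet _ _ _ _ (by omega), pvRowGet _ _ _ _ (by omega)]
  rw [show List.range (j + 2) = List.range (j + 1) ++ [j + 1] from List.range_succ,
    List.map_append, List.map_singleton]
  congr 1
  -- the chosen cell is pvF a b (i+1) (j+1)
  by_cases hC2 : pvD a b (i + 1) j - 2 > pvD a b i (j + 1) - 2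
  · have hmax : (if pvD a b (i + 1) j - 2 > pvD a b i (j + 1) - 2 then pvD a b (i + 1) j - 2
        else pvD a b i (j + 1) - 2) = pvD a b (i + 1) j - 2 := if_pos hC2
    by_cases hC1 : pvD a b i j + pvMutationCost (a.getD i '-') (b.getD j '-') >
        pvD a b (i + 1) j - 2
    · have hD : pvD a b (i + 1) (j + 1)
          = pvD a b i j + pvMutationCost (a.getD i '-') (b.getD j '-') := by
        rw [pvD_succ, hmax, if_pos hC1]
      have hdir : pvPdir a b (i + 1) (j + 1) = (-1, -1) := by
        rw [pvPdir_succ, hmax, if_pos hC1]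
      have hC1' : pvD a b i j + (if a.getD i '-' = b.getD j '-' then 2 else -1) >
          pvD a b (i + 1) j - 2 := by simpa [pvMutationCost] using hC1
      unfold pvF
      rw [pvChars_succ]
      simp only [hdir, hD]
      rw [if_pos hC2, if_pos hC1']
      simp [pvMutationCost]
    · have hD : pvD a b (i + 1) (j + 1) = pvD a b (i + 1) j - 2 := by
        rw [pvD_succ, hmax, if_neg hC1]
      have hdir : pvPdir a b (i + 1) (j + 1) = (0, -1) := by
        rw [pvPdir_succ, hmax, if_neg hC1, if_pos hC2]
      have hC1' : ¬(pvD a b i j + (if a.getD i '-' = b.getD j '-' then 2 else -1) >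
          pvD a b (i + 1) j - 2) := by simpa [pvMutationCost] using hC1
      unfold pvF
      rw [pvChars_succ]
      simp only [hdir, hD]
      rw [if_pos hC2, if_neg hC1']
      simp
  · have hmax : (if pvD a b (i + 1) j - 2 > pvD a b i (j + 1) - 2 then pvD a b (i + 1) j - 2
        else pvD a b i (j + 1) - 2) = pvD a b i (j + 1) - 2 := if_neg hC2
    by_cases hC1 : pvD a b i j + pvMutationCost (a.getD i '-') (b.getD j '-') >
        pvD a b i (j + 1) - 2
    · have hD : pvD a b (i + 1) (j + 1)
          = pvD a b i j + pvMutationCost (a.getD i '-') (b.getD j '-') := by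
        rw [pvD_succ, hmax, if_pos hC1]
      have hdir : pvPdir a b (i + 1) (j + 1) = (-1, -1) := by
        rw [pvPdir_succ, hmax, if_pos hC1]
      have hC1' : pvD a b i j + (if a.getD i '-' = b.getD j '-' then 2 else -1) >
          pvD a b i (j + 1) - 2 := by simpa [pvMutationCost] using hC1
      unfold pvF
      rw [pvChars_succ]
      simp only [hdir, hD]
      rw [if_neg hC2, if_pos hC1']
      simp [pvMutationCost]
    · have hD : pvD a b (i + 1) (j + 1) = pvD a b i (j + 1) - 2 := by
        rw [pvD_succ, hmax, if_neg hC1]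
      have hdir : pvPdir a b (i + 1) (j + 1) = (-1, 0) := by
        rw [pvPdir_succ, hmax, if_neg hC1, if_neg hC2]
      have hC1' : ¬(pvD a b i j + (if a.getD i '-' = b.getD j '-' then 2 else -1) >
          pvD a b i (j + 1) - 2) := by simpa [pvMutationCost] using hC1
      unfold pvF
      rw [pvChars_succ]
      simp only [hdir, hD]
      rw [if_neg hC2, if_neg hC1']
      simp

theorem pvRowB (a b : List Char) (i : Nat) (hi : i < a.length) : ∀ t, t ≤ b.length →
    (PySem.List.enumerate (b.take t) 1).foldl
      (fun cur cj => pvCellB ((List.range (b.length + 1)).map (fun c => pvF a b i c)) cur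
        (a.getD i '-') cj)
      [pvF a b (i + 1) 0]
    = (List.range (t + 1)).map (fun c => pvF a b (i + 1) c) := by
  intro t
  induction t with
  | zero => intro _; simp
  | succ t ih =>
    intro ht
    rw [List.take_succ, List.getElem?_eq_getElem (by omega : t < b.length),
      PySem.List.enumerate_append, List.foldl_append, ih (by omega)]
    simp only [Option.toList_some, PySem.List.enumerate_cons, PySem.List.enumerate_nil,
      List.foldl_cons, List.foldl_nil, List.length_take]
    rw [show (1 : Int) + (min t b.length : Nat) = ((t + 1 : Nat) : Int) by
      rw [min_eq_left (by omega)]; push_cast; ring]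
    rw [show b[t] = b.getD t '-' from (List.getD_eq_getElem b '-' (by omega)).symm]
    exact pvCellB_step a b i t hi (by omega) _ rfl

theorem pvOuterB (a b : List Char) : ∀ t, t ≤ a.length →
    (PySem.List.enumerate (a.take t) 1).foldl
      (fun prev xi =>
        (PySem.List.enumerate b 1).foldl (fun cur cj => pvCellB prev cur xi.2 cj)
          [((0 : Int), PySem.List.slice a none (some xi.1), List.replicate xi.1.toNat '-')])
      ((List.range (b.length + 1)).map (fun c => pvF a b 0 c))
    = (List.range (b.length + 1)).map (fun c => pvF a b t c) := by
  intro t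
  induction t with
  | zero => intro _; simp
  | succ t ih =>
    intro ht
    rw [List.take_succ, List.getElem?_eq_getElem (by omega : t < a.length),
      PySem.List.enumerate_append, List.foldl_append, ih (by omega)]
    simp only [Option.toList_some, PySem.List.enumerate_cons, PySem.List.enumerate_nil,
      List.foldl_cons, List.foldl_nil, List.length_take]
    rw [show (1 : Int) + (min t a.length : Nat) = ((t + 1 : Nat) : Int) by
      rw [min_eq_left (by omega)]; push_cast; ring]
    rw [PySem.List.slice_to a (by positivity), Int.toNat_natCast]
    rw [show ((0 : Int), a.take (t + 1), List.replicate (t + 1) '-') = pvF a b (t + 1) 0 from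
      (pvF_col0 a b (t + 1) (by omega)).symm]
    rw [show a[t] = a.getD t '-' from (List.getD_eq_getElem a '-' (by omega)).symm]
    rw [show PySem.List.enumerate b 1 = PySem.List.enumerate (b.take b.length) 1 by
      rw [List.take_length]]
    exact pvRowB a b t (by omega) b.length (le_refl _)

theorem pvPrev0_eq (a b : List Char) :
    (PySem.List.pyRange 0 ((b.length : Int) + 1) 1).map
      (fun j => ((0 : Int), List.replicate j.toNat '-', PySem.List.slice b none (some j)))
    = (List.range (b.length + 1)).map (fun c => pvF a b 0 c) := by
  rw [PySem.List.pyRange_one]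
  rw [show ((b.length : Int) + 1 - 0).toNat = b.length + 1 by omega]
  rw [List.map_map]
  apply List.map_congr_left
  intro k hk
  have hk' : k ≤ b.length := by
    have := List.mem_range.mp hk
    omega
  simp only [Function.comp_apply, zero_add, Int.toNat_natCast]
  rw [PySem.List.slice_to b (by positivity), Int.toNat_natCast]
  exact (pvF_row0 a b k hk').symm

theorem pvSW_eq (a b : List Char) : pvSmithWatermanA a b = pvAlignB a b := by
  unfold pvSmithWatermanA pvAlignB
  dsimp only
  rw [pvSWFill_eq]
  dsimp only
  rw [pvRecon_eq a b (a.length + b.length + 1) a.length b.length (by omega) (le_refl _)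
    (le_refl _) [] []]
  rw [pvPrev0_eq]
  rw [show PySem.List.enumerate a 1 = PySem.List.enumerate (a.take a.length) 1 by
    rw [List.take_length]]
  rw [pvOuterB a b a.length (le_refl _)]
  rw [show List.range (b.length + 1) = List.range b.length ++ [b.length] from List.range_succ,
    List.map_append, List.map_singleton, PySem.List.pyGetD_neg_one_append_singleton]
  unfold pvF
  simp

-- ===== VERDICT (by name: the statement is the Claim_ definition above) =====
theorem createAlignedGenomes_spec : Claim_equal_createAlignedGenomes := by
  intro S1 S2 MUMs _
  unfold Spec_createAlignedGenomes createAlignedGenomes createAlignedGenomes_alt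
  rw [show pvSmithWatermanA = pvAlignB from funext fun a => funext fun b => pvSW_eq a b]
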